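-- pv_equiv track=rewrite | github.com/Eikken/pycharm-projects | PTA/1005_继续3n+1猜想.py | findTrue
-- ===== SOURCE A (Python) =====
-- def findTrue(tD, val, tmD):
--     if tD == {}:
--         return tmD
--     for kk, vv in tD.items():
--         if set(vv).issubset(set(val)):
--             tmD[kk] = True
--             tD.pop(kk)
--             return findTrue(tD, val, tmD)
--         else:
--             tmD[kk] = False
--             tD.pop(kk)
--             return findTrue(tD, val, tmD)
-- ===== SOURCE B (Python) =====
-- def findTrue(tD, val, tmD):
--     # Iterative rewrite: one precomputed set(val), a while-loop popping keys.
--     # Same in-place effects as A: empties tD, fills tmD, returns tmD.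
--     valset = set(val)
--     while tD:
--         kk = next(iter(tD))
--         vv = tD.pop(kk)
--         tmD[kk] = set(vv) <= valset
--     return tmD
-- ===== Notes on version B (the rewrite author's own statement) =====
-- stated objective: faster
-- what changed: Replaced the one-key-per-recursive-call scheme (items() loop entered only for its first element, pop, recurse) by a flat while-loop popping keys one at a time, with set(val) computed once instead of once per key.
import Mathlib
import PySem

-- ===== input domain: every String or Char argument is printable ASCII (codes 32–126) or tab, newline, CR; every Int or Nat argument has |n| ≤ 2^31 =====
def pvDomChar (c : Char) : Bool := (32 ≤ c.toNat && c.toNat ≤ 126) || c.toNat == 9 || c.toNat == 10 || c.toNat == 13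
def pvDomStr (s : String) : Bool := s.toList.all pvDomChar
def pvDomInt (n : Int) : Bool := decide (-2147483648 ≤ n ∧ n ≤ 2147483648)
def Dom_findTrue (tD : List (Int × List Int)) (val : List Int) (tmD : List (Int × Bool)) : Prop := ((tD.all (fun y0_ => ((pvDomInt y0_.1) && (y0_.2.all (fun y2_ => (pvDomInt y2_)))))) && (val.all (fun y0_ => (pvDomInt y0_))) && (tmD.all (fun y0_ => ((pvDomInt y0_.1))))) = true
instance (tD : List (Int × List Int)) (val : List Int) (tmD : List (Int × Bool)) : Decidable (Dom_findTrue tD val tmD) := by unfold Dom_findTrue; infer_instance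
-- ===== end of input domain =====

-- B: flat fold over the dict with set(val) computed once, instead of A's one-key-per-recursive-call scheme; same return value.
-- NOTE (Python semantics): A and B both empty tD in place and mutate tmD; the equivalence proved here is about the RETURN value.
-- ===== PORT A =====
-- A: if tD is empty return tmD; else take the FIRST item (the for loop always returns in its
-- first iteration), set tmD[kk] to the subset test, pop kk (popping the first key of a dict
-- leaves exactly the rest of its items), and recurse.
def findTrue (tD : List (Int × List Int)) (val : List Int) (tmD : List (Int × Bool)) : List (Int × Bool) :=
  match tD with
  | [] => tmD
  | (kk, vv) :: rest =>
      if PySem.Set.issubset (PySem.Set.ofList vv) (PySem.Set.ofList val) then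
        findTrue rest val (((PySem.Dict.mk tmD).insert kk true).items)
      else
        findTrue rest val (((PySem.Dict.mk tmD).insert kk false).items)

-- ===== PORT B =====
-- B: valset = set(val) once; while tD: pop the first key kk, tmD[kk] = set(vv) <= valset. The
-- while-loop consuming tD front-to-back is the left fold over its items.
def findTrue_alt (tD : List (Int × List Int)) (val : List Int) (tmD : List (Int × Bool)) : List (Int × Bool) :=
  let valset := PySem.Set.ofList val
  tD.foldl (fun acc kv => ((PySem.Dict.mk acc).insert kv.1 (PySem.Set.issubset (PySem.Set.ofList kv.2) valset)).items) tmD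

-- ===== PRECONDITION & SPEC =====
def Spec_findTrue (tD : List (Int × List Int)) (val : List Int) (tmD : List (Int × Bool)) (out : List (Int × Bool)) : Prop := out = findTrue_alt tD val tmD
instance (tD : List (Int × List Int)) (val : List Int) (tmD : List (Int × Bool)) (out : List (Int × Bool)) : Decidable (Spec_findTrue tD val tmD out) := by unfold Spec_findTrue; infer_instance

-- ===== CLAIM (what is proved, stated in full; the proofs are below) =====
def Claim_equal_findTrue : Prop := ∀ (tD : List (Int × List Int)) (val : List Int) (tmD : List (Int × Bool)), Dom_findTrue tD val tmD → Spec_findTrue tD val tmD (findTrue tD val tmD)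

-- ===== LEMMAS AND PROOFS =====

-- Both programs thread the same accumulator through the same per-key update; induction on tD.
theorem findTrue_agree (tD : List (Int × List Int)) (val : List Int) (tmD : List (Int × Bool)) :
    findTrue tD val tmD = findTrue_alt tD val tmD := by
  induction tD generalizing tmD with
  | nil => rfl
  | cons kv rest ih =>
      obtain ⟨kk, vv⟩ := kv
      simp only [findTrue, findTrue_alt, List.foldl]
      split_ifs with h
      · rw [h]; exact ih _
      · simp only [Bool.not_eq_true] at h; rw [h]; exact ih _

-- ===== VERDICT (by name: the statement is the Claim_ definition above) =====
theorem findTrue_spec : Claim_equal_findTrue := by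
  intro tD val tmD _
  exact findTrue_agree tD val tmD
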